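-- pv_equiv track=rewrite | github.com/ZhaoKangming/Data_Tools | devide_numb_range.py | devide_numb_range
-- ===== SOURCE A (Python) =====
-- def devide_numb_range(sNumb: int, eNumb:int, parts:int) -> list:
--     '''
--     Function: 把整数段 sNumb 到 eNumb 划分为 parts 部分
--     '''
--     parts_list: list = []
--     remainder: int = (eNumb - sNumb) % (parts - 1)
--     GCD: int = int((eNumb - sNumb - remainder) / (parts - 1))
--
--     for i in range(0, parts-1):
--         parts_list.append([sNumb + i*GCD, sNumb + (i+1)*GCD])
--
--     parts_list.append([eNumb - remainder, eNumb])
--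
--     return parts_list
-- ===== SOURCE B (Python) =====
-- def devide_numb_range(sNumb: int, eNumb: int, parts: int) -> list:
--     '''Divide sNumb..eNumb into parts intervals, walking back from the end, then reversing.'''
--     remainder = (eNumb - sNumb) % (parts - 1)
--     step = int((eNumb - sNumb - remainder) / (parts - 1))
--     out = [[eNumb - remainder, eNumb]]
--     hi = eNumb - remainder
--     for _ in range(parts - 1):
--         out.append([hi - step, hi])
--         hi -= step
--     return out[::-1]
-- ===== Notes on version B (the rewrite author's own statement) =====
-- stated objective: alternative
-- what changed: B constructs the intervals back-to-front: starting from the final interval [eNumb-remainder, eNumb] it walks the upper endpoint down by the step, collecting each preceding interval, and reverses at the end, instead of A's forward index loop appending [s+i*G, s+(i+1)*G]; correct because the step divides eNumb-remainder-sNumb exactly.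
import Mathlib
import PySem

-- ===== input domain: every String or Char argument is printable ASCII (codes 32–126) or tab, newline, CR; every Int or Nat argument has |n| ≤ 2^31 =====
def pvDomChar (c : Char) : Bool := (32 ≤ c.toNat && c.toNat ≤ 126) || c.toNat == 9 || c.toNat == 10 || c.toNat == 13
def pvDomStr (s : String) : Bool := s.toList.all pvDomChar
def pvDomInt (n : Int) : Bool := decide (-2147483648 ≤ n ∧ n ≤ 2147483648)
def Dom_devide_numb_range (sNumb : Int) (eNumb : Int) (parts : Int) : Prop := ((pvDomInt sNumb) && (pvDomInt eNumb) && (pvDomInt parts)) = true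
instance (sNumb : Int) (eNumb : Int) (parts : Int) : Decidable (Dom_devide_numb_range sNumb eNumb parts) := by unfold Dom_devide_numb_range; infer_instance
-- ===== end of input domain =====

-- B builds the interval list back-to-front, starting from the last interval and appending
-- each preceding one while stepping the upper endpoint down, then reverses (objective: alternative).

-- ===== PORT A =====
-- int((eNumb - sNumb - remainder) / (parts-1)) is ported as floor division: the divisor
-- divides the numerator exactly (the remainder was subtracted), and on Dom the operands are
-- far below 2^53, so Python's float division is exact and int() of it equals this quotient.
def devide_numb_range (sNumb : Int) (eNumb : Int) (parts : Int) : List (List Int) :=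
  let remainder : Int := PySem.Int.mod (eNumb - sNumb) (parts - 1)
  let GCD : Int := PySem.Int.floordiv (eNumb - sNumb - remainder) (parts - 1)
  let parts_list : List (List Int) :=
    (PySem.List.pyRange 0 (parts - 1) 1).foldl
      (fun acc i => acc ++ [[sNumb + i * GCD, sNumb + (i + 1) * GCD]]) []
  parts_list ++ [[eNumb - remainder, eNumb]]

-- ===== PORT B =====
-- the loop 'for _ in range(parts-1): out.append([hi-step, hi]); hi -= step',
-- as structural recursion on the (nonnegative part of the) iteration count;
-- out[::-1] is ported as List.reverse (exact: full reversed slice)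
def dnrBuild (step : Int) : Nat → Int → List (List Int) → List (List Int)
  | 0, _, out => out
  | n + 1, hi, out => dnrBuild step n (hi - step) (out ++ [[hi - step, hi]])

def devide_numb_range_alt (sNumb : Int) (eNumb : Int) (parts : Int) : List (List Int) :=
  let remainder : Int := PySem.Int.mod (eNumb - sNumb) (parts - 1)
  let step : Int := PySem.Int.floordiv (eNumb - sNumb - remainder) (parts - 1)
  (dnrBuild step (parts - 1).toNat (eNumb - remainder) [[eNumb - remainder, eNumb]]).reverse

-- ===== PRECONDITION & SPEC =====
-- parts = 1 makes A divide and take a modulus by zero (ZeroDivisionError), so it is excluded.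
def Pre_devide_numb_range (sNumb : Int) (eNumb : Int) (parts : Int) : Prop := parts ≠ 1
instance (sNumb : Int) (eNumb : Int) (parts : Int) : Decidable (Pre_devide_numb_range sNumb eNumb parts) := by unfold Pre_devide_numb_range; infer_instance
def pvWitness_devide_numb_range : Int × Int × Int := (0, 10, 3)

def Spec_devide_numb_range (sNumb : Int) (eNumb : Int) (parts : Int) (out : List (List Int)) : Prop := out = devide_numb_range_alt sNumb eNumb parts
instance (sNumb : Int) (eNumb : Int) (parts : Int) (out : List (List Int)) : Decidable (Spec_devide_numb_range sNumb eNumb parts out) := by unfold Spec_devide_numb_range; infer_instance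

-- ===== CLAIM (what is proved, stated in full; the proofs are below) =====
def Claim_equal_devide_numb_range : Prop := ∀ (sNumb : Int) (eNumb : Int) (parts : Int), Dom_devide_numb_range sNumb eNumb parts → Pre_devide_numb_range sNumb eNumb parts → Spec_devide_numb_range sNumb eNumb parts (devide_numb_range sNumb eNumb parts)

-- ===== LEMMAS AND PROOFS =====

theorem foldl_append_map (l : List Nat) (g : Nat → List Int) (init : List (List Int)) :
    l.foldl (fun acc i => acc ++ [g i]) init = init ++ l.map g := by
  induction l generalizing init with
  | nil => simp
  | cons x t ih => simp [List.foldl, ih]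

-- loop invariant of B's back-to-front construction: started at hi = s + k*G it lays
-- down exactly the k forward intervals in front of the accumulator
theorem dnrBuild_inv (G s : Int) (k : Nat) (acc : List (List Int)) :
    (dnrBuild G k (s + k * G) acc).reverse
      = (List.range k).map (fun i : Nat => [s + (i : Int) * G, s + ((i : Int) + 1) * G]) ++ acc.reverse := by
  induction k generalizing acc with
  | zero => simp [dnrBuild]
  | succ m ih =>
    have h1 : s + ((m : Int) + 1) * G - G = s + (m : Int) * G := by ring
    have h2 : ((m + 1 : Nat) : Int) = (m : Int) + 1 := by push_cast; ring
    rw [show dnrBuild G (m+1) (s + ((m+1 : Nat) : Int) * G) acc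
          = dnrBuild G m (s + ((m+1 : Nat) : Int) * G - G)
              (acc ++ [[s + ((m+1 : Nat) : Int) * G - G, s + ((m+1 : Nat) : Int) * G]]) from rfl,
      h2, h1, ih, List.range_succ, List.map_append, List.map_singleton]
    simp

-- exact division: with r the floor-mod, d divides a - r and floordiv recovers the quotient
theorem exact_div (a d : Int) :
    d * PySem.Int.floordiv (a - PySem.Int.mod a d) d = a - PySem.Int.mod a d := by
  have h1 := PySem.Int.floordiv_mul_add_mod a d
  have h2 : a - PySem.Int.mod a d = PySem.Int.floordiv a d * d := by omega
  rw [h2]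
  have h5 : PySem.Int.mod (PySem.Int.floordiv a d * d) d = 0 :=
    (PySem.Int.mod_eq_zero_iff_dvd _ _).mpr (dvd_mul_left d (PySem.Int.floordiv a d))
  have h4 := PySem.Int.floordiv_mul_add_mod (PySem.Int.floordiv a d * d) d
  have h6 : PySem.Int.floordiv (PySem.Int.floordiv a d * d) d * d
      = PySem.Int.floordiv a d * d := by omega
  calc d * PySem.Int.floordiv (PySem.Int.floordiv a d * d) d
      = PySem.Int.floordiv (PySem.Int.floordiv a d * d) d * d := by ring
    _ = PySem.Int.floordiv a d * d := h6

theorem main_core (s e d r G : Int) (hkey : s + d * G = e - r) :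
    ((PySem.List.pyRange 0 d 1).foldl
        (fun acc i => acc ++ [[s + i * G, s + (i + 1) * G]]) ([] : List (List Int)))
      ++ [[e - r, e]]
    = (dnrBuild G d.toNat (e - r) [[e - r, e]]).reverse := by
  by_cases hdpos : 0 < d
  · have hcast : ((d.toNat : Nat) : Int) = d := Int.toNat_of_nonneg (by omega)
    have hrange : PySem.List.pyRange 0 d 1
        = (List.range d.toNat).map (fun i : Nat => (i : Int)) := by
      rw [PySem.List.pyRange_one, sub_zero]
      exact List.map_congr_left (fun i _ => by omega)
    have hstart : e - r = s + (d.toNat : Int) * G := by rw [hcast]; omega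
    rw [hrange, List.foldl_map,
      foldl_append_map (List.range d.toNat)
        (fun i : Nat => [s + (i : Int) * G, s + ((i : Int) + 1) * G]) [],
      List.nil_append, hstart, dnrBuild_inv, List.reverse_singleton]
  · have h0 : d.toNat = 0 := by omega
    rw [h0, PySem.List.pyRange_one_eq_nil (by omega)]
    rfl

-- ===== VERDICT (by name: the statement is the Claim_ definition above) =====
theorem devide_numb_range_spec : Claim_equal_devide_numb_range := by
  intro s e parts _ hpre
  have hkey : s + (parts - 1) * PySem.Int.floordiv
      (e - s - PySem.Int.mod (e - s) (parts - 1)) (parts - 1)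
      = e - PySem.Int.mod (e - s) (parts - 1) := by
    have := exact_div (e - s) (parts - 1)
    omega
  exact main_core s e (parts - 1) (PySem.Int.mod (e - s) (parts - 1))
    (PySem.Int.floordiv (e - s - PySem.Int.mod (e - s) (parts - 1)) (parts - 1)) hkey
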